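-- pv_equiv track=rewrite | github.com/astroupia/codeforces-solutions | Freinds and the Restaurant.py | max_restaurant_days
-- ===== SOURCE A (Python) =====
-- def max_restaurant_days(n, x, y):
--     differences = sorted([y[i] - x[i] for i in range(n)])
--     left, right = 0, n - 1
--     days = 0
--
--     while left < right:
--         if differences[left] + differences[right] >= 0:
--             days += 1
--             left += 1
--             right -= 1
--         else:
--             left += 1
--
--     return days
-- ===== SOURCE B (Python) =====
-- def max_restaurant_days(n, x, y):
--     d = sorted(b - a for a, b in zip(x[:n], y[:n]))
--     days = 0
--     while len(d) >= 2:
--         if d[0] + d[-1] >= 0: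
--             days += 1
--             d = d[1:-1]
--         else:
--             d = d[1:]
--     return days
-- ===== Notes on version B (the rewrite author's own statement) =====
-- stated objective: alternative
-- what changed: B replaces A's index-based two-pointer walk over a fixed array with a loop that shrinks the sorted difference list itself from both ends (head/last via slices), and builds the differences by zipping the two prefix slices instead of indexing over range(n).
-- outside the precondition, e.g. on max_restaurant_days(-1, [0, 0, 0], [1, 1, 1]): A returns 0, B returns 1; on max_restaurant_days(3, [1], [1]): A raises IndexError, B returns 0
import Mathlib
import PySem

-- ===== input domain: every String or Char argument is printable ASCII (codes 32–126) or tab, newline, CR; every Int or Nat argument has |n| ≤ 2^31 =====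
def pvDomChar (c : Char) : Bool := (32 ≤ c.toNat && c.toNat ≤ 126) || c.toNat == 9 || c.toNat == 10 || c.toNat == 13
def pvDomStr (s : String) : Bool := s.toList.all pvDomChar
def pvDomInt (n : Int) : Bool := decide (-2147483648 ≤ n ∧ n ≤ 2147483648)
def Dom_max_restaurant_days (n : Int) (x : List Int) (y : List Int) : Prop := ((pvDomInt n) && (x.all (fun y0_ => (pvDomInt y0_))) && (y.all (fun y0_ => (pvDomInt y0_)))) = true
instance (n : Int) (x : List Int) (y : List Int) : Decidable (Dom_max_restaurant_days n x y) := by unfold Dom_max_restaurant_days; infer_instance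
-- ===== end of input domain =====

-- B replaces A's index-based two-pointer walk over a fixed array with a loop that shrinks the
-- sorted difference list itself from both ends; same result, different decomposition (objective: alternative).

-- ===== PORT A =====
-- the while loop of A, on the state (left, right, days)
def pvLoopA (d : List Int) (left right days : Int) : Int :=
  if h : left < right then
    if PySem.List.pyGetD d left 0 + PySem.List.pyGetD d right 0 ≥ 0 then
      pvLoopA d (left + 1) (right - 1) (days + 1)
    else
      pvLoopA d (left + 1) right days
  else days
termination_by (right - left).toNat
decreasing_by all_goals omega

def max_restaurant_days (n : Int) (x : List Int) (y : List Int) : Int :=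
  let differences :=
    PySem.List.sorted ((PySem.List.pyRange 0 n 1).map
      (fun i => PySem.List.pyGetD y i 0 - PySem.List.pyGetD x i 0)) (fun v => v)
  pvLoopA differences 0 (n - 1) 0

-- ===== PORT B =====
-- the while loop of B: shrink the list from both ends, keeping only the count 'days'
def pvGoB (d : List Int) (days : Int) : Int :=
  if h : d.length < 2 then days
  else if PySem.List.pyGetD d 0 0 + PySem.List.pyGetD d (-1) 0 ≥ 0 then
    pvGoB (PySem.List.slice d (some 1) (some (-1))) (days + 1)
  else
    pvGoB (PySem.List.slice d (some 1) none) days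
termination_by d.length
decreasing_by
  · cases d with
    | nil => simp_all
    | cons a t =>
      rw [PySem.List.length_slice]
      simp [PySem.List.clampIdx]
      split_ifs <;> omega
  · rw [PySem.List.slice_from_one]
    simp
    omega

def max_restaurant_days_alt (n : Int) (x : List Int) (y : List Int) : Int :=
  pvGoB (PySem.List.sorted
    (((PySem.List.slice x none (some n)).zip (PySem.List.slice y none (some n))).map
      (fun p => p.2 - p.1)) (fun v => v)) 0

-- ===== PRECONDITION & SPEC =====
-- Pre_ excludes inputs with n > len(x) or n > len(y), on which A raises IndexError, and
-- negative n (a malformed friend count, outside the task's natural domain), on which A's 0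
-- and B's value on the end-relative slices are both accidents of the implementations.
def Pre_max_restaurant_days (n : Int) (x : List Int) (y : List Int) : Prop :=
  0 ≤ n ∧ n ≤ x.length ∧ n ≤ y.length
instance (n : Int) (x : List Int) (y : List Int) : Decidable (Pre_max_restaurant_days n x y) := by
  unfold Pre_max_restaurant_days; infer_instance

def pvWitness_max_restaurant_days : Int × List Int × List Int := (3, [1, 2, 3], [3, 0, 4])

def Spec_max_restaurant_days (n : Int) (x : List Int) (y : List Int) (out : Int) : Prop := out = max_restaurant_days_alt n x y
instance (n : Int) (x : List Int) (y : List Int) (out : Int) : Decidable (Spec_max_restaurant_days n x y out) := by unfold Spec_max_restaurant_days; infer_instance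

-- ===== CLAIM (what is proved, stated in full; the proofs are below) =====
def Claim_equal_max_restaurant_days : Prop := ∀ (n : Int) (x : List Int) (y : List Int), Dom_max_restaurant_days n x y → Pre_max_restaurant_days n x y → Spec_max_restaurant_days n x y (max_restaurant_days n x y)

-- ===== LEMMAS AND PROOFS =====

-- The two programs build the same sorted list of differences.
theorem pv_diffs_eq (n : Int) (x y : List Int)
    (h0 : 0 ≤ n) (hx : n ≤ x.length) (hy : n ≤ y.length) :
    (PySem.List.pyRange 0 n 1).map (fun i => PySem.List.pyGetD y i 0 - PySem.List.pyGetD x i 0) =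
      ((PySem.List.slice x none (some n)).zip (PySem.List.slice y none (some n))).map
        (fun p => p.2 - p.1) := by
  rw [PySem.List.slice_to x h0, PySem.List.slice_to y h0]
  apply List.ext_getElem
  · simp [PySem.List.length_pyRange_one]; omega
  · intro k h1 h2
    have hk : (k : Int) < n := by
      simp [PySem.List.length_pyRange_one] at h1; omega
    have hkx : k < x.length := by omega
    have hky : k < y.length := by omega
    simp [PySem.List.getElem_pyRange_one, List.getElem_zip, List.getElem_take,
      PySem.List.pyGetD_natCast, List.getD_eq_getElem?_getD, hkx, hky]

-- d[1:-1] on a list of length ≥ 2 is drop 1 then take (len - 2)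
theorem pv_slice_one_neg_one (xs : List Int) (h : 2 ≤ xs.length) :
    PySem.List.slice xs (some 1) (some (-1)) = (xs.drop 1).take (xs.length - 2) := by
  have hd : xs ≠ [] := by intro hh; subst hh; simp at h
  simp [PySem.List.slice, PySem.List.clampIdx, hd]
  rw [Nat.min_eq_left (by omega), List.drop_one]
  congr 1
  omega

-- The two-pointer loop on d between indices l and r computes days + go on the sublist d[l:r+1].
theorem pv_loop_eq_go (d : List Int) :
    ∀ (fuel : Nat) (l r days : Int), (r + 1 - l).toNat ≤ fuel → 0 ≤ l → r < d.length →
      pvLoopA d l r days = pvGoB ((d.drop l.toNat).take (r + 1 - l).toNat) days := by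
  intro fuel
  induction fuel with
  | zero =>
    intro l r days hf hl hr
    have hnlr : ¬ l < r := by omega
    have hlen : ((d.drop l.toNat).take (r + 1 - l).toNat).length < 2 := by simp; omega
    rw [pvLoopA, dif_neg hnlr, pvGoB, dif_pos hlen]
  | succ m ih =>
    intro l r days hf hl hr
    by_cases hlr : l < r
    · set k := (r + 1 - l).toNat with hk
      have hk2 : 2 ≤ k := by omega
      have hsublen : ((d.drop l.toNat).take k).length = k := by simp; omega
      have hnsub2 : ¬ ((d.drop l.toNat).take k).length < 2 := by omega
      have hget0 : PySem.List.pyGetD ((d.drop l.toNat).take k) 0 0 = PySem.List.pyGetD d l 0 := by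
        rw [@PySem.List.pyGetD_eq_getElem Int ((d.drop l.toNat).take k) 0 0 (by omega) (by omega),
            @PySem.List.pyGetD_eq_getElem Int d l 0 hl (by omega)]
        simp
      have hne : (d.drop l.toNat).take k ≠ [] := by
        intro hh; rw [hh] at hsublen; simp at hsublen; omega
      have hgetlast : PySem.List.pyGetD ((d.drop l.toNat).take k) (-1) 0 = PySem.List.pyGetD d r 0 := by
        rw [PySem.List.pyGetD_neg_one _ 0 hne,
            @PySem.List.pyGetD_eq_getElem Int d r 0 (by omega) hr]
        rw [List.getLast_eq_getElem]
        simp only [hsublen, List.getElem_take, List.getElem_drop]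
        congr 1
        omega
      rw [pvLoopA, dif_pos hlr]
      by_cases hcond : PySem.List.pyGetD d l 0 + PySem.List.pyGetD d r 0 ≥ 0
      · rw [if_pos hcond, ih (l + 1) (r - 1) (days + 1) (by omega) (by omega) (by omega)]
        conv_rhs => rw [pvGoB, dif_neg hnsub2, hget0, hgetlast, if_pos hcond,
          pv_slice_one_neg_one _ (by rw [hsublen]; omega),
          hsublen, List.drop_take, List.drop_drop, List.take_take,
          Nat.min_eq_left (by omega),
          show l.toNat + 1 = (l + 1).toNat by omega,
          show k - 2 = (r - 1 + 1 - (l + 1)).toNat by omega]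
      · rw [if_neg hcond, ih (l + 1) r days (by omega) (by omega) hr]
        conv_rhs => rw [pvGoB, dif_neg hnsub2, hget0, hgetlast, if_neg hcond,
          PySem.List.slice_from_one, ← List.drop_one, List.drop_take, List.drop_drop,
          show l.toNat + 1 = (l + 1).toNat by omega,
          show k - 1 = (r + 1 - (l + 1)).toNat by omega]
    · have hlen : ((d.drop l.toNat).take (r + 1 - l).toNat).length < 2 := by simp; omega
      rw [pvLoopA, dif_neg hlr, pvGoB, dif_pos hlen]

-- ===== VERDICT (by name: the statement is the Claim_ definition above) =====
theorem max_restaurant_days_spec : Claim_equal_max_restaurant_days := by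
  intro n x y _hdom ⟨h0, hx, hy⟩
  unfold Spec_max_restaurant_days max_restaurant_days max_restaurant_days_alt
  rw [pv_diffs_eq n x y h0 hx hy]
  set D := PySem.List.sorted
    (((PySem.List.slice x none (some n)).zip (PySem.List.slice y none (some n))).map
      (fun p => p.2 - p.1)) (fun v => v) with hD
  have hlen : (D.length : Int) = n := by
    rw [hD, PySem.List.length_sorted, PySem.List.slice_to x h0, PySem.List.slice_to y h0]
    simp; omega
  rw [pv_loop_eq_go D (n - 1 + 1 - 0).toNat 0 (n - 1) 0 (le_refl _) (le_refl 0) (by omega)]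
  rw [Int.toNat_zero, List.drop_zero, List.take_of_length_le (by omega)]
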